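-- pv_equiv track=rewrite | github.com/klinek/foai-project | tictactoe.py | CheckSecondDigit
-- ===== SOURCE A (Python) =====
-- def CheckSecondDigit(board, player):
--     count = 0
--     for row in range(len(board)):
--         for col in range(len(board[row])):
--             if(len(board)) - row - 1 == col and board[row][col] == player:
--                 count +=1
--     if count == 3:
--         return True
--     else:
--         return False
-- ===== SOURCE B (Python) =====
-- def CheckSecondDigit(board, player):
--     n = len(board)
--     count = 0
--     for i, row in enumerate(board):
--         j = n - 1 - i
--         if j < len(row) and row[j] == player:
--             count += 1
--     return count == 3
-- ===== Notes on version B (the rewrite author's own statement) =====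
-- stated objective: faster
-- what changed: Replaces the full nested scan of every cell with a single pass that visits only the one anti-diagonal cell per row (guarded for short/jagged rows).
import Mathlib
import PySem

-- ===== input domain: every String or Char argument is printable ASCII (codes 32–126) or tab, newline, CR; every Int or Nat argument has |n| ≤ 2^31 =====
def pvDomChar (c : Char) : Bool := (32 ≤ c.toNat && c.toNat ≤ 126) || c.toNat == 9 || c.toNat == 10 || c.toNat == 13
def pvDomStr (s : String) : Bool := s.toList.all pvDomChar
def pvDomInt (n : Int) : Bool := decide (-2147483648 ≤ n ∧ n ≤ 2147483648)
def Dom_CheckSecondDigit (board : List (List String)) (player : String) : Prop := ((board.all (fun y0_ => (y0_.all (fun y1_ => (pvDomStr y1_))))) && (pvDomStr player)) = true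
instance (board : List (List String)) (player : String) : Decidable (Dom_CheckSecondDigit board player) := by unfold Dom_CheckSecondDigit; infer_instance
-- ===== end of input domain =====

-- B replaces A's full nested scan of every cell by a single pass that looks only at
-- the one anti-diagonal cell of each row (guarded for short/jagged rows).

-- ===== PORT A =====
-- literal transliteration: nested loops over row/col indices, count matching
-- anti-diagonal cells, then `if count == 3 then True else False`.
-- (indices produced by the loops are always in range, so `getD` is exact)
def CheckSecondDigit (board : List (List String)) (player : String) : Bool :=
  let count :=
    (List.range board.length).foldl (fun c r =>
      (List.range (board.getD r []).length).foldl (fun c2 col =>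
        if (board.length - r - 1 == col) && ((board.getD r []).getD col "" == player)
        then c2 + 1 else c2) c) 0
  if count == 3 then true else false

-- ===== PORT B =====
-- B's loop: walk the rows once with their index, check only column n-1-i.
def altGo (n : Nat) (player : String) : Nat → List (List String) → Nat → Nat
  | _, [], c => c
  | i, row :: rest, c =>
      altGo n player (i + 1) rest
        (if (decide (n - 1 - i < row.length)) && (row.getD (n - 1 - i) "" == player)
         then c + 1 else c)

def CheckSecondDigit_alt (board : List (List String)) (player : String) : Bool :=
  let n := board.length
  altGo n player 0 board 0 == 3

-- ===== PRECONDITION & SPEC =====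
def Spec_CheckSecondDigit (board : List (List String)) (player : String) (out : Bool) : Prop := out = CheckSecondDigit_alt board player
instance (board : List (List String)) (player : String) (out : Bool) : Decidable (Spec_CheckSecondDigit board player out) := by unfold Spec_CheckSecondDigit; infer_instance

-- ===== CLAIM (what is proved, stated in full; the proofs are below) =====
def Claim_equal_CheckSecondDigit : Prop := ∀ (board : List (List String)) (player : String), Dom_CheckSecondDigit board player → Spec_CheckSecondDigit board player (CheckSecondDigit board player)

-- ===== LEMMAS AND PROOFS =====

-- A's inner loop over a row adds 1 exactly when the target column k is in range
-- and holds the player's mark.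
theorem inner_fold (k : Nat) (row : List String) (player : String) :
    ∀ (m c : Nat),
      (List.range m).foldl (fun c2 col =>
        if (k == col) && (row.getD col "" == player) then c2 + 1 else c2) c
      = c + (if (decide (k < m)) && (row.getD k "" == player) then 1 else 0) := by
  intro m
  induction m with
  | zero => intro c; simp
  | succ m ih =>
    intro c
    rw [List.range_succ, List.foldl_append, ih]
    simp only [List.foldl_cons, List.foldl_nil]
    by_cases hk : k = m
    · subst hk
      simp
      split <;> omega
    · have h1 : (k == m) = false := by simp [hk]
      have hkm : k < m ↔ k ≤ m := by omega
      simp [h1, hkm]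

-- Folding an index-dependent "+0/+1" over all row indices equals B's single pass.
theorem range_fold_eq_altGo (n : Nat) (player : String) :
    ∀ (bs : List (List String)) (base c : Nat),
      (List.range bs.length).foldl (fun c2 r =>
        c2 + (if (decide (n - 1 - (base + r) < (bs.getD r []).length))
                 && ((bs.getD r []).getD (n - 1 - (base + r)) "" == player)
              then 1 else 0)) c
      = altGo n player base bs c := by
  intro bs
  induction bs with
  | nil => intro base c; simp [altGo]
  | cons row rest ih =>
    intro base c
    rw [List.length_cons, List.range_succ_eq_map, List.foldl_cons, List.foldl_map]
    have hfun : (fun (c2 : Nat) (r : Nat) =>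
        c2 + (if (decide (n - 1 - (base + (r + 1)) < ((row :: rest).getD (r + 1) []).length))
                 && (((row :: rest).getD (r + 1) []).getD (n - 1 - (base + (r + 1))) "" == player)
              then 1 else 0))
        = (fun (c2 : Nat) (r : Nat) =>
        c2 + (if (decide (n - 1 - ((base + 1) + r) < (rest.getD r []).length))
                 && ((rest.getD r []).getD (n - 1 - ((base + 1) + r)) "" == player)
              then 1 else 0)) := by
      funext c2 r
      have h : base + (r + 1) = (base + 1) + r := by omega
      simp [h]
    rw [hfun, ih]
    rw [show altGo n player base (row :: rest) c
        = altGo n player (base + 1) rest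
            (if (decide (n - 1 - base < row.length)) && (row.getD (n - 1 - base) "" == player)
             then c + 1 else c) from rfl]
    congr 1
    simp only [List.getD_cons_zero, Nat.add_zero]
    split <;> omega

-- ===== VERDICT (by name: the statement is the Claim_ definition above) =====
theorem CheckSecondDigit_spec : Claim_equal_CheckSecondDigit := by
  intro board player _
  unfold Spec_CheckSecondDigit CheckSecondDigit CheckSecondDigit_alt
  have hinner : (fun (c : Nat) (r : Nat) =>
      (List.range (board.getD r []).length).foldl (fun c2 col =>
        if (board.length - r - 1 == col) && ((board.getD r []).getD col "" == player)
        then c2 + 1 else c2) c)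
      = (fun (c : Nat) (r : Nat) =>
      c + (if (decide (board.length - 1 - (0 + r) < (board.getD r []).length))
              && ((board.getD r []).getD (board.length - 1 - (0 + r)) "" == player)
           then 1 else 0)) := by
    funext c r
    rw [inner_fold]
    have h : board.length - r - 1 = board.length - 1 - (0 + r) := by omega
    rw [h]
  simp only [hinner]
  rw [range_fold_eq_altGo]
  by_cases h : altGo board.length player 0 board 0 = 3 <;> simp [h]
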